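-- pv_equiv track=rewrite | github.com/mohammadfaiizan/ProjectI | DSA/Theory/Dynamic_Programming/006_dp_strings.py | lcs_with_k_differences
-- ===== SOURCE A (Python) =====
-- def lcs_with_k_differences(text1: str, text2: str, k: int) -> int:
--     """
--     LCS allowing at most k character differences
--
--     Args:
--         text1, text2: Input strings
--         k: Maximum allowed differences
--
--     Returns:
--         Length of LCS with at most k differences
--     """
--     m, n = len(text1), len(text2)
--
--     # dp[i][j][d] = LCS length for text1[0:i], text2[0:j] with d differences
--     dp = [[[0 for _ in range(k + 1)] for _ in range(n + 1)] for _ in range(m + 1)]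
--
--     for i in range(1, m + 1):
--         for j in range(1, n + 1):
--             for d in range(k + 1):
--                 if text1[i - 1] == text2[j - 1]:
--                     dp[i][j][d] = dp[i - 1][j - 1][d] + 1
--                 else:
--                     dp[i][j][d] = max(dp[i - 1][j][d], dp[i][j - 1][d])
--
--                     # Allow difference if within limit
--                     if d > 0:
--                         dp[i][j][d] = max(dp[i][j][d], dp[i - 1][j - 1][d - 1] + 1)
--
--     return max(dp[m][n][d] for d in range(k + 1))
-- ===== SOURCE B (Python) =====
-- def lcs_with_k_differences(text1: str, text2: str, k: int) -> int:
--     """LCS allowing at most k character differences: top-down memoized evaluation of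
--     f(i, j, d) driven by an explicit work stack (post-order), so only the states
--     reachable from (m, n, d) are ever computed."""
--     m, n = len(text1), len(text2)
--     memo = {}
--
--     def solve(i0, j0, d0):
--         stack = [(i0, j0, d0, False)]
--         while stack:
--             i, j, d, expanded = stack.pop()
--             if (i, j, d) in memo:
--                 continue
--             if i == 0 or j == 0:
--                 memo[(i, j, d)] = 0
--                 continue
--             if not expanded:
--                 # schedule this state after its missing dependencies
--                 stack.append((i, j, d, True))
--                 if text1[i - 1] == text2[j - 1]:
--                     stack.append((i - 1, j - 1, d, False))
--                 else:
--                     stack.append((i - 1, j, d, False))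
--                     stack.append((i, j - 1, d, False))
--                     if d > 0:
--                         stack.append((i - 1, j - 1, d - 1, False))
--             else:
--                 # all dependencies are memoized now
--                 if text1[i - 1] == text2[j - 1]:
--                     res = memo[(i - 1, j - 1, d)] + 1
--                 else:
--                     res = max(memo[(i - 1, j, d)], memo[(i, j - 1, d)])
--                     if d > 0:
--                         res = max(res, memo[(i - 1, j - 1, d - 1)] + 1)
--                 memo[(i, j, d)] = res
--         return memo[(i0, j0, d0)]
--
--     return max(solve(m, n, d) for d in range(k + 1))
-- ===== Notes on version B (the rewrite author's own statement) =====
-- stated objective: alternative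
-- what changed: A's bottom-up triple loop filling an explicit 3D table is replaced by top-down memoized recursion on (i, j, d): only the states actually reachable from (m, n, d) are ever computed and stored in a dict, instead of eagerly materialising all (m+1)*(n+1)*(k+1) cells.
import Mathlib
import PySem

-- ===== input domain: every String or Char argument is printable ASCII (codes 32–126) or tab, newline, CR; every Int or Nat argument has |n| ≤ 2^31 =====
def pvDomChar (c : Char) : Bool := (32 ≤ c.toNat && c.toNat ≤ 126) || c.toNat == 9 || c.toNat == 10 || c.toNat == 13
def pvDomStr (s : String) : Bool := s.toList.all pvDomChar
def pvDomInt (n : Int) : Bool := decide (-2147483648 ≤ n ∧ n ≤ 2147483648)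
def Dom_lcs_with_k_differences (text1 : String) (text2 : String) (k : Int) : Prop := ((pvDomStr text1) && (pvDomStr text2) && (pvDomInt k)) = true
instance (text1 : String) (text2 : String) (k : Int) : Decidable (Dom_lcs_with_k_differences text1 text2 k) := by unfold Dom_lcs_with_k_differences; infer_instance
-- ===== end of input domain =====

-- B replaces A's bottom-up triple loop over an explicit 3D table by top-down memoized
-- evaluation driven by an explicit work stack, computing only reachable states; objective: alternative.

-- ===== PORT A =====
-- dp is Python's nested list; pvGet3/pvSet3 are plain nested-list indexing/assignment.
-- All indices A uses are in range (loops start at 1, `d > 0` guards d-1), so getD/set are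
-- exact images of Python's dp[i][j][d] reads and writes here.
def pvGet3 (dp : List (List (List Int))) (i j d : Nat) : Int :=
  ((dp.getD i []).getD j []).getD d 0

def pvSet3 (dp : List (List (List Int))) (i j d : Nat) (v : Int) : List (List (List Int)) :=
  dp.set i ((dp.getD i []).set j (((dp.getD i []).getD j []).set d v))

-- the body of A's innermost loop (one (i, j, d) cell), verbatim
def pvCellA (t1 t2 : List Char) (i j d : Nat) (dp : List (List (List Int))) : List (List (List Int)) :=
  if t1.getD (i-1) ' ' = t2.getD (j-1) ' ' then
    pvSet3 dp i j d (pvGet3 dp (i-1) (j-1) d + 1)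
  else if 0 < d then   -- v = max(dp[i-1][j][d], dp[i][j-1][d]); v = max(v, dp[i-1][j-1][d-1]+1)
    pvSet3 dp i j d (max (max (pvGet3 dp (i-1) j d) (pvGet3 dp i (j-1) d)) (pvGet3 dp (i-1) (j-1) (d-1) + 1))
  else
    pvSet3 dp i j d (max (pvGet3 dp (i-1) j d) (pvGet3 dp i (j-1) d))

def lcs_with_k_differences (text1 : String) (text2 : String) (k : Int) : Int :=
  let t1 := text1.toList
  let t2 := text2.toList
  let m := t1.length
  let n := t2.length
  let kk := (k + 1).toNat    -- the number of d values in range(k + 1); 0 when k < 0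
  let dp0 := List.replicate (m+1) (List.replicate (n+1) (List.replicate kk (0:Int)))
  let dp := (List.range m).foldl (fun dp i0 =>
      (List.range n).foldl (fun dp j0 =>
        (List.range kk).foldl (fun dp d => pvCellA t1 t2 (i0+1) (j0+1) d dp) dp) dp) dp0
  -- max(dp[m][n][d] for d in range(k + 1)); empty range → Python ValueError (excluded by Pre_)
  match (List.range kk).map (fun d => pvGet3 dp m n d) with
  | [] => 0
  | v :: vs => vs.foldl max v

-- ===== PORT B =====
-- B's work-stack entries are (i, j, d, expanded); stack top = list head (Python pops from
-- the end, so the last-appended entry is the head here). The memo is a Python dict used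
-- only for membership tests, reads and writes (never iterated), so Std.HashMap is an
-- exact image of it. pvPhi is the termination measure of the while loop (a proof
-- artefact; it computes nothing the Python computes).
def pvWeight (e : Nat × Nat × Nat × Bool) : Nat :=
  (if e.2.2.2 then 1 else 2) * 8 ^ (e.1 + e.2.1)

def pvPhi : List (Nat × Nat × Nat × Bool) → Nat
  | [] => 0
  | e :: rest => pvWeight e + pvPhi rest

theorem pvWeight_pos (e : Nat × Nat × Nat × Bool) : 0 < pvWeight e := by
  unfold pvWeight
  have : 0 < 8 ^ (e.1 + e.2.1) := pow_pos (by norm_num) _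
  cases e.2.2.2 <;> simp <;> omega

theorem pvPhi_pop (e : Nat × Nat × Nat × Bool) (rest : List (Nat × Nat × Nat × Bool)) :
    pvPhi rest < pvPhi (e :: rest) := by
  have := pvWeight_pos e
  show pvPhi rest < pvWeight e + pvPhi rest
  omega

theorem pv_pow_split (i' j' : Nat) :
    8 ^ (i' + 1 + (j' + 1)) = 64 * 8 ^ (i' + j') ∧
    8 ^ (i' + 1 + j') = 8 * 8 ^ (i' + j') ∧
    8 ^ (i' + (j' + 1)) = 8 * 8 ^ (i' + j') := by
  refine ⟨?_, ?_, ?_⟩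
  · rw [show i' + 1 + (j' + 1) = (i' + j') + 2 from by omega, pow_add]; ring
  · rw [show i' + 1 + j' = (i' + j') + 1 from by omega, pow_add]; ring
  · rw [show i' + (j' + 1) = (i' + j') + 1 from by omega, pow_add]; ring

theorem pvPhi_push_eq (i' j' d : Nat) (rest : List (Nat × Nat × Nat × Bool)) :
    pvPhi ((i', j', d, false) :: (i' + 1, j' + 1, d, true) :: rest) <
      pvPhi ((i' + 1, j' + 1, d, false) :: rest) := by
  obtain ⟨h1, h2, h3⟩ := pv_pow_split i' j'
  have hw : 0 < 8 ^ (i' + j') := pow_pos (by norm_num) _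
  simp only [pvPhi, pvWeight, Bool.false_eq_true, if_false, if_true]
  simp only [h1]
  omega

theorem pvPhi_push_pos (i' j' d : Nat) (rest : List (Nat × Nat × Nat × Bool)) :
    pvPhi ((i', j', d - 1, false) :: (i' + 1, j', d, false) :: (i', j' + 1, d, false) ::
        (i' + 1, j' + 1, d, true) :: rest) <
      pvPhi ((i' + 1, j' + 1, d, false) :: rest) := by
  obtain ⟨h1, h2, h3⟩ := pv_pow_split i' j'
  have hw : 0 < 8 ^ (i' + j') := pow_pos (by norm_num) _
  simp only [pvPhi, pvWeight, Bool.false_eq_true, if_false, if_true]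
  simp only [h1, h2, h3]
  omega

theorem pvPhi_push_zero (i' j' d : Nat) (rest : List (Nat × Nat × Nat × Bool)) :
    pvPhi ((i' + 1, j', d, false) :: (i', j' + 1, d, false) ::
        (i' + 1, j' + 1, d, true) :: rest) <
      pvPhi ((i' + 1, j' + 1, d, false) :: rest) := by
  obtain ⟨h1, h2, h3⟩ := pv_pow_split i' j'
  have hw : 0 < 8 ^ (i' + j') := pow_pos (by norm_num) _
  simp only [pvPhi, pvWeight, Bool.false_eq_true, if_false, if_true]
  simp only [h1, h2, h3]
  omega

-- the while loop of B's `solve`, one branch per branch of the loop body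
def pvRun (t1 t2 : List Char) (stack : List (Nat × Nat × Nat × Bool))
    (memo : Std.HashMap (Nat × Nat × Nat) Int) : Std.HashMap (Nat × Nat × Nat) Int :=
  match stack with
  | [] => memo
  | (i, j, d, expanded) :: rest =>
    if memo.contains (i, j, d) then                   -- if (i, j, d) in memo: continue
      pvRun t1 t2 rest memo
    else if i = 0 ∨ j = 0 then                        -- memo[(i, j, d)] = 0; continue
      pvRun t1 t2 rest (memo.insert (i, j, d) 0)
    else if expanded = false then                     -- push this state, then its deps
      if t1.getD (i-1) ' ' = t2.getD (j-1) ' ' then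
        pvRun t1 t2 ((i-1, j-1, d, false) :: (i, j, d, true) :: rest) memo
      else if 0 < d then
        pvRun t1 t2 ((i-1, j-1, d-1, false) :: (i, j-1, d, false) :: (i-1, j, d, false) ::
          (i, j, d, true) :: rest) memo
      else
        pvRun t1 t2 ((i, j-1, d, false) :: (i-1, j, d, false) :: (i, j, d, true) :: rest) memo
    else                                              -- all deps memoized: compute res
      if t1.getD (i-1) ' ' = t2.getD (j-1) ' ' then
        pvRun t1 t2 rest (memo.insert (i, j, d) (memo.getD (i-1, j-1, d) 0 + 1))
      else if 0 < d then
        pvRun t1 t2 rest (memo.insert (i, j, d)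
          (max (max (memo.getD (i-1, j, d) 0) (memo.getD (i, j-1, d) 0))
            (memo.getD (i-1, j-1, d-1) 0 + 1)))
      else
        pvRun t1 t2 rest (memo.insert (i, j, d)
          (max (memo.getD (i-1, j, d) 0) (memo.getD (i, j-1, d) 0)))
  termination_by pvPhi stack
  decreasing_by
  · exact pvPhi_pop _ _
  · exact pvPhi_pop _ _
  · have hexp : expanded = false := by assumption
    subst hexp
    obtain ⟨i', rfl⟩ := Nat.exists_eq_succ_of_ne_zero (show i ≠ 0 by omega)
    obtain ⟨j', rfl⟩ := Nat.exists_eq_succ_of_ne_zero (show j ≠ 0 by omega)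
    simpa using pvPhi_push_eq i' j' d rest
  · have hexp : expanded = false := by assumption
    subst hexp
    obtain ⟨i', rfl⟩ := Nat.exists_eq_succ_of_ne_zero (show i ≠ 0 by omega)
    obtain ⟨j', rfl⟩ := Nat.exists_eq_succ_of_ne_zero (show j ≠ 0 by omega)
    simpa using pvPhi_push_pos i' j' d rest
  · have hexp : expanded = false := by assumption
    subst hexp
    obtain ⟨i', rfl⟩ := Nat.exists_eq_succ_of_ne_zero (show i ≠ 0 by omega)
    obtain ⟨j', rfl⟩ := Nat.exists_eq_succ_of_ne_zero (show j ≠ 0 by omega)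
    simpa using pvPhi_push_zero i' j' d rest
  · exact pvPhi_pop _ _
  · exact pvPhi_pop _ _
  · exact pvPhi_pop _ _

def lcs_with_k_differences_alt (text1 : String) (text2 : String) (k : Int) : Int :=
  let t1 := text1.toList
  let t2 := text2.toList
  let m := t1.length
  let n := t2.length
  -- max(solve(m, n, d) for d in range(k + 1)): the memo dict persists across the generator
  let st := (List.range (k + 1).toNat).foldl
    (fun (st : Std.HashMap (Nat × Nat × Nat) Int × List Int) d =>
      let memo := pvRun t1 t2 [(m, n, d, false)] st.1
      (memo, st.2 ++ [memo.getD (m, n, d) 0]))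
    (∅, [])
  -- empty when k < 0 → Python ValueError (excluded by Pre_)
  match st.2 with
  | [] => 0
  | v :: vs => vs.foldl max v

-- ===== PRECONDITION & SPEC =====
-- For k < 0 both A and B raise ValueError (max over the empty range(k+1)); Pre_ excludes exactly that.
def Pre_lcs_with_k_differences (text1 : String) (text2 : String) (k : Int) : Prop := 0 ≤ k
instance (text1 : String) (text2 : String) (k : Int) : Decidable (Pre_lcs_with_k_differences text1 text2 k) := by unfold Pre_lcs_with_k_differences; infer_instance

def pvWitness_lcs_with_k_differences : String × String × Int := ("ab", "cb", 1)

def Spec_lcs_with_k_differences (text1 : String) (text2 : String) (k : Int) (out : Int) : Prop := out = lcs_with_k_differences_alt text1 text2 k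
instance (text1 : String) (text2 : String) (k : Int) (out : Int) : Decidable (Spec_lcs_with_k_differences text1 text2 k out) := by unfold Spec_lcs_with_k_differences; infer_instance

-- ===== CLAIM (what is proved, stated in full; the proofs are below) =====
def Claim_equal_lcs_with_k_differences : Prop := ∀ (text1 : String) (text2 : String) (k : Int), Dom_lcs_with_k_differences text1 text2 k → Pre_lcs_with_k_differences text1 text2 k → Spec_lcs_with_k_differences text1 text2 k (lcs_with_k_differences text1 text2 k)

-- ===== LEMMAS AND PROOFS =====

-- the LCS-with-at-most-d-differences recurrence, as a pure recursion: the common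
-- specification both A's table and B's memoized function are proved to compute
def pvF (t1 t2 : List Char) : Nat → Nat → Nat → Int
  | 0, _, _ => 0
  | _+1, 0, _ => 0
  | i+1, j+1, d =>
    if t1.getD i ' ' = t2.getD j ' ' then
      pvF t1 t2 i j d + 1
    else
      match d with
      | 0 => max (pvF t1 t2 i (j+1) 0) (pvF t1 t2 (i+1) j 0)
      | d'+1 => max (max (pvF t1 t2 i (j+1) (d'+1)) (pvF t1 t2 (i+1) j (d'+1))) (pvF t1 t2 i j d' + 1)
  termination_by i j d => (i, j)

theorem pvF_zero_right (t1 t2 : List Char) (i d : Nat) : pvF t1 t2 i 0 d = 0 := by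
  cases i <;> simp [pvF]

theorem pvF_zero_left (t1 t2 : List Char) (j d : Nat) : pvF t1 t2 0 j d = 0 := by
  simp [pvF]

theorem pvF_succ_zero (t1 t2 : List Char) (i j : Nat) : pvF t1 t2 (i+1) (j+1) 0 =
    if t1.getD i ' ' = t2.getD j ' ' then pvF t1 t2 i j 0 + 1
    else max (pvF t1 t2 i (j+1) 0) (pvF t1 t2 (i+1) j 0) := by
  rw [pvF]

theorem pvF_succ_succ (t1 t2 : List Char) (i j d : Nat) : pvF t1 t2 (i+1) (j+1) (d+1) =
    if t1.getD i ' ' = t2.getD j ' ' then pvF t1 t2 i j (d+1) + 1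
    else max (max (pvF t1 t2 i (j+1) (d+1)) (pvF t1 t2 (i+1) j (d+1))) (pvF t1 t2 i j d + 1) := by
  rw [pvF]

-- ===== A side: the table fills pvF =====

def Shape3 (dp : List (List (List Int))) (M N K : Nat) : Prop :=
  dp.length = M ∧ ∀ r ∈ dp, r.length = N ∧ ∀ c ∈ r, c.length = K

theorem pv_getD_set_self {α : Type} {l : List α} {i : Nat} (h : i < l.length) (a dflt : α) :
    (l.set i a).getD i dflt = a := by
  simp [List.getD_eq_getElem?_getD, List.getElem?_set_self h]

theorem pv_getD_set_ne {α : Type} {l : List α} {i j : Nat} (h : i ≠ j) (a dflt : α) :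
    (l.set i a).getD j dflt = l.getD j dflt := by
  simp [List.getD_eq_getElem?_getD, List.getElem?_set_ne h]

theorem pv_getD_mem {α : Type} {l : List α} {i : Nat} (h : i < l.length) (dflt : α) :
    l.getD i dflt ∈ l := by
  rw [List.getD_eq_getElem l dflt h]
  exact List.getElem_mem h

theorem pv_getD_replicate {α : Type} {M i : Nat} (h : i < M) (x y : α) :
    (List.replicate M x).getD i y = x := by
  rw [List.getD_eq_getElem?_getD, List.getElem?_replicate, if_pos h]
  rfl

theorem shape3_replicate (M N K : Nat) :
    Shape3 (List.replicate M (List.replicate N (List.replicate K (0:Int)))) M N K := by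
  refine ⟨by simp, ?_⟩
  intro r hr
  rw [List.eq_of_mem_replicate hr]
  refine ⟨by simp, ?_⟩
  intro c hc
  rw [List.eq_of_mem_replicate hc]
  simp

theorem shape3_set3 {dp : List (List (List Int))} {M N K i j d : Nat} {v : Int}
    (hs : Shape3 dp M N K) (hi : i < M) (hj : j < N) (hd : d < K) :
    Shape3 (pvSet3 dp i j d v) M N K := by
  obtain ⟨hlen, hrow⟩ := hs
  have hid : i < dp.length := by omega
  have hrmem : dp.getD i [] ∈ dp := pv_getD_mem hid []
  obtain ⟨hrl, hcell⟩ := hrow _ hrmem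
  have hjd : j < (dp.getD i []).length := by omega
  have hcmem : (dp.getD i []).getD j [] ∈ dp.getD i [] := pv_getD_mem hjd []
  have hcl := hcell _ hcmem
  refine ⟨by simp [pvSet3, hlen], ?_⟩
  intro r hr
  rcases List.mem_or_eq_of_mem_set hr with hr' | hr'
  · exact hrow _ hr'
  · subst hr'
    refine ⟨by rw [List.length_set]; exact hrl, ?_⟩
    intro c hc
    rcases List.mem_or_eq_of_mem_set hc with hc' | hc'
    · exact hcell _ hc'
    · subst hc'
      rw [List.length_set]
      exact hcl

theorem get3_set3_self {dp : List (List (List Int))} {M N K i j d : Nat} {v : Int}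
    (hs : Shape3 dp M N K) (hi : i < M) (hj : j < N) (hd : d < K) :
    pvGet3 (pvSet3 dp i j d v) i j d = v := by
  obtain ⟨hlen, hrow⟩ := hs
  have hid : i < dp.length := by omega
  have hrmem : dp.getD i [] ∈ dp := pv_getD_mem hid []
  obtain ⟨hrl, hcell⟩ := hrow _ hrmem
  have hjd : j < (dp.getD i []).length := by omega
  have hcmem : (dp.getD i []).getD j [] ∈ dp.getD i [] := pv_getD_mem hjd []
  have hcl := hcell _ hcmem
  unfold pvGet3 pvSet3
  rw [pv_getD_set_self hid, pv_getD_set_self hjd, pv_getD_set_self (by omega)]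

theorem get3_set3_ne {dp : List (List (List Int))} {i j d i' j' d' : Nat} {v : Int}
    (h : ¬ (i' = i ∧ j' = j ∧ d' = d)) :
    pvGet3 (pvSet3 dp i j d v) i' j' d' = pvGet3 dp i' j' d' := by
  unfold pvGet3 pvSet3
  by_cases hi : i = i'
  · subst hi
    by_cases hil : i < dp.length
    · rw [pv_getD_set_self hil]
      by_cases hj : j = j'
      · subst hj
        by_cases hjl : j < (dp.getD i []).length
        · rw [pv_getD_set_self hjl]
          have hd : d ≠ d' := by tauto
          rw [pv_getD_set_ne hd]
        · rw [List.set_eq_of_length_le (show ((dp.getD i []).length ≤ j) by omega)]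
      · rw [pv_getD_set_ne hj]
    · rw [List.set_eq_of_length_le (by omega)]
  · rw [pv_getD_set_ne hi]

-- the loop invariant: rows 1..r are filled, row r+1 is filled up to column c,
-- and in cell (r+1, c+1) the d-entries below e are filled; everything else is 0
def InvD (t1 t2 : List Char) (K r c e : Nat) (dp : List (List (List Int))) : Prop :=
  Shape3 dp (t1.length+1) (t2.length+1) K ∧
  ∀ i j d, i ≤ t1.length → j ≤ t2.length → d < K →
    pvGet3 dp i j d =
      if i ≤ r ∨ (i = r+1 ∧ j ≤ c) ∨ (i = r+1 ∧ j = c+1 ∧ d < e) then pvF t1 t2 i j d else 0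

theorem foldl_range_inv {α : Type} (f : α → Nat → α) (P : Nat → α → Prop) (n : Nat) (a : α)
    (h0 : P 0 a) (hs : ∀ i b, i < n → P i b → P (i+1) (f b i)) :
    P n ((List.range n).foldl f a) := by
  induction n with
  | zero => simpa using h0
  | succ n ih =>
    rw [List.range_succ, List.foldl_append]
    exact hs n _ (Nat.lt_succ_self n) (ih (fun i b hi hb => hs i b (Nat.lt_succ_of_lt hi) hb))

theorem invD_step (t1 t2 : List Char) (K r c e : Nat) (dp : List (List (List Int)))
    (hr : r < t1.length) (hc : c < t2.length) (he : e < K)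
    (h : InvD t1 t2 K r c e dp) :
    InvD t1 t2 K r c (e+1) (pvCellA t1 t2 (r+1) (c+1) e dp) := by
  obtain ⟨hs, hv⟩ := h
  have hset : ∀ v, Shape3 (pvSet3 dp (r+1) (c+1) e v) (t1.length+1) (t2.length+1) K :=
    fun v => shape3_set3 hs (by omega) (by omega) he
  constructor
  · unfold pvCellA
    split_ifs <;> exact hset _
  · intro i j d hi hj hd
    by_cases hme : i = r+1 ∧ j = c+1 ∧ d = e
    · obtain ⟨h1, h2, h3⟩ := hme
      subst h1; subst h2; subst h3
      rw [if_pos (by omega)]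
      unfold pvCellA
      simp only [Nat.add_sub_cancel]
      by_cases hch : t1.getD r ' ' = t2.getD c ' '
      · rw [if_pos hch, get3_set3_self hs (by omega) (by omega) he,
            hv r c d (by omega) (by omega) he, if_pos (by omega)]
        cases d with
        | zero => rw [pvF_succ_zero, if_pos hch]
        | succ e' => rw [pvF_succ_succ, if_pos hch]
      · rw [if_neg hch]
        cases d with
        | zero =>
          rw [if_neg (by omega), get3_set3_self hs (by omega) (by omega) he,
              hv r (c+1) 0 (by omega) (by omega) he, if_pos (by omega),
              hv (r+1) c 0 (by omega) (by omega) he, if_pos (by omega),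
              pvF_succ_zero, if_neg hch]
        | succ e' =>
          rw [if_pos (by omega), get3_set3_self hs (by omega) (by omega) he]
          simp only [Nat.add_sub_cancel]
          rw [hv r (c+1) (e'+1) (by omega) (by omega) he, if_pos (by omega),
              hv (r+1) c (e'+1) (by omega) (by omega) he, if_pos (by omega),
              hv r c e' (by omega) (by omega) (by omega), if_pos (by omega),
              pvF_succ_succ, if_neg hch]
    · have huntouched : pvGet3 (pvCellA t1 t2 (r+1) (c+1) e dp) i j d = pvGet3 dp i j d := by
        unfold pvCellA
        split_ifs <;> exact get3_set3_ne (by tauto)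
      rw [huntouched, hv i j d hi hj hd]
      split_ifs with h1 h2
      · rfl
      · omega
      · omega
      · rfl

theorem invD_cell_done (t1 t2 : List Char) (K r c : Nat) (dp : List (List (List Int)))
    (h : InvD t1 t2 K r c K dp) : InvD t1 t2 K r (c+1) 0 dp := by
  obtain ⟨hs, hv⟩ := h
  refine ⟨hs, ?_⟩
  intro i j d hi hj hd
  rw [hv i j d hi hj hd]
  split_ifs with h1 h2
  · rfl
  · omega
  · omega
  · rfl

theorem invD_row_done (t1 t2 : List Char) (K r : Nat) (dp : List (List (List Int)))
    (h : InvD t1 t2 K r t2.length 0 dp) : InvD t1 t2 K (r+1) 0 0 dp := by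
  obtain ⟨hs, hv⟩ := h
  refine ⟨hs, ?_⟩
  intro i j d hi hj hd
  rw [hv i j d hi hj hd]
  split_ifs with h1 h2
  · rfl
  · omega
  · have hj0 : j = 0 := by omega
    subst hj0
    rw [pvF_zero_right]
  · rfl

theorem invD_init (t1 t2 : List Char) (K : Nat) :
    InvD t1 t2 K 0 0 0
      (List.replicate (t1.length+1) (List.replicate (t2.length+1) (List.replicate K (0:Int)))) := by
  refine ⟨shape3_replicate _ _ _, ?_⟩
  intro i j d hi hj hd
  have hz : pvGet3 (List.replicate (t1.length+1) (List.replicate (t2.length+1) (List.replicate K (0:Int)))) i j d = 0 := by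
    unfold pvGet3
    rw [pv_getD_replicate (by omega), pv_getD_replicate (by omega), pv_getD_replicate (by omega)]
  rw [hz]
  split_ifs with h1
  · rcases h1 with h1 | h1 | h1
    · have : i = 0 := by omega
      subst this
      rw [pvF_zero_left]
    · have : j = 0 := by omega
      subst this
      rw [pvF_zero_right]
    · omega
  · rfl

theorem dp_final (t1 t2 : List Char) (K : Nat) :
    ∀ d < K,
      pvGet3 ((List.range t1.length).foldl (fun dp i0 =>
        (List.range t2.length).foldl (fun dp j0 =>
          (List.range K).foldl (fun dp d => pvCellA t1 t2 (i0+1) (j0+1) d dp) dp) dp)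
        (List.replicate (t1.length+1) (List.replicate (t2.length+1) (List.replicate K (0:Int)))))
        t1.length t2.length d
      = pvF t1 t2 t1.length t2.length d := by
  intro d hd
  have hInv : InvD t1 t2 K t1.length 0 0
      ((List.range t1.length).foldl (fun dp i0 =>
        (List.range t2.length).foldl (fun dp j0 =>
          (List.range K).foldl (fun dp d => pvCellA t1 t2 (i0+1) (j0+1) d dp) dp) dp)
        (List.replicate (t1.length+1) (List.replicate (t2.length+1) (List.replicate K (0:Int))))) := by
    apply foldl_range_inv _ (fun r dp => InvD t1 t2 K r 0 0 dp)
    · exact invD_init t1 t2 K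
    · intro r dpa hr hInvA
      apply invD_row_done
      apply foldl_range_inv _ (fun c dp => InvD t1 t2 K r c 0 dp)
      · exact hInvA
      · intro c dpb hc hInvB
        apply invD_cell_done
        apply foldl_range_inv _ (fun e dp => InvD t1 t2 K r c e dp)
        · exact hInvB
        · intro e dpc heK hInvC
          exact invD_step t1 t2 K r c e dpc hr hc heK hInvC
  obtain ⟨hs, hv⟩ := hInv
  rw [hv t1.length t2.length d le_rfl le_rfl hd, if_pos (by omega)]

-- ===== B side: the stack machine fills the memo with pvF values =====

-- the dependencies of a non-base state (a proof-side restatement of the pushes)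
def pvDeps (t1 t2 : List Char) (i j d : Nat) : List (Nat × Nat × Nat) :=
  if t1.getD (i-1) ' ' = t2.getD (j-1) ' ' then [(i-1, j-1, d)]
  else if 0 < d then [(i-1, j, d), (i, j-1, d), (i-1, j-1, d-1)]
  else [(i-1, j, d), (i, j-1, d)]

theorem pvDeps_eqc (t1 t2 : List Char) (i' j' d : Nat)
    (hch : t1.getD i' ' ' = t2.getD j' ' ') :
    pvDeps t1 t2 (i'+1) (j'+1) d = [(i', j', d)] := by
  simp only [pvDeps, Nat.add_sub_cancel]
  rw [if_pos hch]

theorem pvDeps_posd (t1 t2 : List Char) (i' j' d : Nat)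
    (hch : ¬ t1.getD i' ' ' = t2.getD j' ' ') (hd : 0 < d) :
    pvDeps t1 t2 (i'+1) (j'+1) d = [(i', j'+1, d), (i'+1, j', d), (i', j', d-1)] := by
  simp only [pvDeps, Nat.add_sub_cancel]
  rw [if_neg hch, if_pos hd]

theorem pvDeps_zerod (t1 t2 : List Char) (i' j' d : Nat)
    (hch : ¬ t1.getD i' ' ' = t2.getD j' ' ') (hd : ¬ 0 < d) :
    pvDeps t1 t2 (i'+1) (j'+1) d = [(i', j'+1, d), (i'+1, j', d)] := by
  simp only [pvDeps, Nat.add_sub_cancel]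
  rw [if_neg hch, if_neg hd]

-- every value stored in the memo is the pvF value of its key
def MemoOkH (t1 t2 : List Char) (memo : Std.HashMap (Nat × Nat × Nat) Int) : Prop :=
  ∀ i j d v, memo[((i, j, d) : Nat × Nat × Nat)]? = some v → v = pvF t1 t2 i j d

-- every expanded entry has each dependency either memoized or scheduled above it
def GS (t1 t2 : List Char) :
    List (Nat × Nat × Nat × Bool) → List (Nat × Nat × Nat) →
    Std.HashMap (Nat × Nat × Nat) Int → Prop
  | [], _, _ => True
  | (i, j, d, b) :: rest, above, memo =>
    (b = true → ∀ p ∈ pvDeps t1 t2 i j d, memo.contains p = true ∨ p ∈ above) ∧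
    GS t1 t2 rest ((i, j, d) :: above) memo

theorem GS_mono (t1 t2 : List Char) :
    ∀ (stack : List (Nat × Nat × Nat × Bool)) (above above' : List (Nat × Nat × Nat))
      (memo memo' : Std.HashMap (Nat × Nat × Nat) Int),
      (∀ p : Nat × Nat × Nat, (memo.contains p = true ∨ p ∈ above) →
        (memo'.contains p = true ∨ p ∈ above')) →
      GS t1 t2 stack above memo → GS t1 t2 stack above' memo' := by
  intro stack
  induction stack with
  | nil => intro _ _ _ _ _ _; trivial
  | cons e rest ih =>
    obtain ⟨i, j, d, b⟩ := e
    intro above above' memo memo' himp h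
    obtain ⟨h1, h2⟩ := h
    refine ⟨fun hb p hp => himp p (h1 hb p hp), ?_⟩
    refine ih _ _ _ _ ?_ h2
    intro p hp
    rcases hp with hm | hm
    · rcases himp p (Or.inl hm) with h' | h'
      · exact Or.inl h'
      · exact Or.inr (List.mem_cons_of_mem _ h')
    · rcases List.mem_cons.mp hm with h' | h'
      · exact Or.inr (List.mem_cons.mpr (Or.inl h'))
      · rcases himp p (Or.inr h') with h'' | h''
        · exact Or.inl h''
        · exact Or.inr (List.mem_cons_of_mem _ h'')

theorem memoOkH_insert {t1 t2 : List Char} {memo : Std.HashMap (Nat × Nat × Nat) Int}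
    (h : MemoOkH t1 t2 memo) (i j d : Nat) :
    MemoOkH t1 t2 (memo.insert (i, j, d) (pvF t1 t2 i j d)) := by
  intro i' j' d' v hv
  rw [Std.HashMap.getElem?_insert] at hv
  by_cases he : ((i, j, d) : Nat × Nat × Nat) = (i', j', d')
  · rw [if_pos (beq_iff_eq.mpr he)] at hv
    injection hv with hv
    simp only [Prod.mk.injEq] at he
    obtain ⟨rfl, rfl, rfl⟩ := he
    exact hv.symm
  · rw [if_neg (by simp [he])] at hv
    exact h i' j' d' v hv

theorem contains_of_contains_insert {memo : Std.HashMap (Nat × Nat × Nat) Int}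
    {p q : Nat × Nat × Nat} {v : Int} (h : memo.contains p = true) :
    (memo.insert q v).contains p = true := by
  rw [Std.HashMap.contains_insert]
  simp [h]

theorem getD_eq_pvF_of_contains {t1 t2 : List Char} {memo : Std.HashMap (Nat × Nat × Nat) Int}
    (hok : MemoOkH t1 t2 memo) {i j d : Nat}
    (h : memo.contains ((i, j, d) : Nat × Nat × Nat) = true) :
    memo.getD ((i, j, d) : Nat × Nat × Nat) 0 = pvF t1 t2 i j d := by
  rw [Std.HashMap.contains_eq_isSome_getElem?] at h
  obtain ⟨v, hv⟩ := Option.isSome_iff_exists.mp h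
  rw [Std.HashMap.getD_eq_getD_getElem?, hv]
  exact hok i j d v hv

theorem contains_insert_self {memo : Std.HashMap (Nat × Nat × Nat) Int}
    (q : Nat × Nat × Nat) (v : Int) : (memo.insert q v).contains q = true := by
  simp [Std.HashMap.contains_insert]

theorem pvRun_correct (t1 t2 : List Char) :
    ∀ (stack : List (Nat × Nat × Nat × Bool)) (memo : Std.HashMap (Nat × Nat × Nat) Int),
      MemoOkH t1 t2 memo → GS t1 t2 stack [] memo →
      MemoOkH t1 t2 (pvRun t1 t2 stack memo) ∧
      (∀ p : Nat × Nat × Nat, memo.contains p = true →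
        (pvRun t1 t2 stack memo).contains p = true) ∧
      (∀ e ∈ stack, (pvRun t1 t2 stack memo).contains ((e.1, e.2.1, e.2.2.1) : Nat × Nat × Nat) = true) := by
  have main : ∀ (N : Nat) (stack : List (Nat × Nat × Nat × Bool))
      (memo : Std.HashMap (Nat × Nat × Nat) Int), pvPhi stack ≤ N →
      MemoOkH t1 t2 memo → GS t1 t2 stack [] memo →
      MemoOkH t1 t2 (pvRun t1 t2 stack memo) ∧
      (∀ p : Nat × Nat × Nat, memo.contains p = true →
        (pvRun t1 t2 stack memo).contains p = true) ∧
      (∀ e ∈ stack, (pvRun t1 t2 stack memo).contains ((e.1, e.2.1, e.2.2.1) : Nat × Nat × Nat) = true) := by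
    intro N
    induction N with
    | zero =>
      intro stack memo hphi hok hgs
      match stack with
      | [] =>
        rw [pvRun]
        exact ⟨hok, fun p hp => hp, by simp⟩
      | e :: rest =>
        exfalso
        have h1 := pvWeight_pos e
        have : pvPhi (e :: rest) = pvWeight e + pvPhi rest := rfl
        omega
    | succ N ih =>
      intro stack memo hphi hok hgs
      match stack with
      | [] =>
        rw [pvRun]
        exact ⟨hok, fun p hp => hp, by simp⟩
      | (i, j, d, expanded) :: rest =>
        have hcons : pvPhi ((i, j, d, expanded) :: rest) =
            pvWeight (i, j, d, expanded) + pvPhi rest := rfl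
        have hwpos := pvWeight_pos (i, j, d, expanded)
        obtain ⟨hgs1, hgs2⟩ := hgs
        rw [pvRun]
        by_cases hc : memo.contains ((i, j, d) : Nat × Nat × Nat) = true
        · rw [if_pos hc]
          have hgs' : GS t1 t2 rest [] memo := by
            refine GS_mono t1 t2 rest _ _ _ _ ?_ hgs2
            intro p hp
            rcases hp with hm | hm
            · exact Or.inl hm
            · simp only [List.mem_singleton] at hm
              subst hm
              exact Or.inl hc
          obtain ⟨r1, r2, r3⟩ := ih rest memo (by omega) hok hgs'
          refine ⟨r1, r2, ?_⟩
          intro e he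
          rcases List.mem_cons.mp he with rfl | he'
          · exact r2 _ hc
          · exact r3 e he'
        · rw [if_neg hc]
          by_cases hz : i = 0 ∨ j = 0
          · rw [if_pos hz]
            have hv0 : pvF t1 t2 i j d = 0 := by
              rcases hz with rfl | rfl
              · exact pvF_zero_left t1 t2 j d
              · exact pvF_zero_right t1 t2 i d
            have hok1 : MemoOkH t1 t2 (memo.insert (i, j, d) 0) := by
              have := memoOkH_insert hok i j d
              rwa [hv0] at this
            have hgs' : GS t1 t2 rest [] (memo.insert (i, j, d) 0) := by
              refine GS_mono t1 t2 rest _ _ _ _ ?_ hgs2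
              intro p hp
              rcases hp with hm | hm
              · exact Or.inl (contains_of_contains_insert hm)
              · simp only [List.mem_singleton] at hm
                subst hm
                exact Or.inl (contains_insert_self _ _)
            obtain ⟨r1, r2, r3⟩ := ih rest _ (by omega) hok1 hgs'
            refine ⟨r1, fun p hp => r2 p (contains_of_contains_insert hp), ?_⟩
            intro e he
            rcases List.mem_cons.mp he with rfl | he'
            · exact r2 _ (contains_insert_self _ _)
            · exact r3 e he'
          · rw [if_neg hz]
            obtain ⟨i', rfl⟩ := Nat.exists_eq_succ_of_ne_zero (show i ≠ 0 by omega)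
            obtain ⟨j', rfl⟩ := Nat.exists_eq_succ_of_ne_zero (show j ≠ 0 by omega)
            simp only [Nat.succ_sub_one, Nat.succ_eq_add_one] at hphi hcons hwpos hgs1 hgs2 hc ⊢
            by_cases hexp : expanded = false
            · rw [if_pos hexp]
              subst hexp
              by_cases hch : t1.getD i' ' ' = t2.getD j' ' '
              · rw [if_pos hch]
                have hgs' : GS t1 t2 ((i', j', d, false) :: (i'+1, j'+1, d, true) :: rest)
                    [] memo := by
                  refine ⟨by simp, ?_, ?_⟩
                  · intro _ p hp
                    rw [pvDeps_eqc t1 t2 i' j' d hch] at hp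
                    simp only [List.mem_singleton] at hp
                    subst hp
                    exact Or.inr (by simp)
                  · refine GS_mono t1 t2 rest _ _ _ _ ?_ hgs2
                    intro p hp
                    rcases hp with hm | hm
                    · exact Or.inl hm
                    · simp only [List.mem_singleton] at hm
                      subst hm
                      exact Or.inr (by simp)
                have hlt := pvPhi_push_eq i' j' d rest
                obtain ⟨r1, r2, r3⟩ := ih _ memo (by omega) hok hgs'
                refine ⟨r1, r2, ?_⟩
                intro e he
                rcases List.mem_cons.mp he with rfl | he'
                · exact r3 (i'+1, j'+1, d, true) (by simp)
                · exact r3 e (by simp [he'])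
              · rw [if_neg hch]
                by_cases hd : 0 < d
                · rw [if_pos hd]
                  have hgs' : GS t1 t2 ((i', j', d-1, false) :: (i'+1, j', d, false) ::
                      (i', j'+1, d, false) :: (i'+1, j'+1, d, true) :: rest) [] memo := by
                    refine ⟨by simp, by simp, by simp, ?_, ?_⟩
                    · intro _ p hp
                      rw [pvDeps_posd t1 t2 i' j' d hch hd] at hp
                      simp only [List.mem_cons, List.not_mem_nil, or_false] at hp
                      rcases hp with rfl | rfl | rfl
                      · exact Or.inr (by simp)
                      · exact Or.inr (by simp)
                      · exact Or.inr (by simp)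
                    · refine GS_mono t1 t2 rest _ _ _ _ ?_ hgs2
                      intro p hp
                      rcases hp with hm | hm
                      · exact Or.inl hm
                      · simp only [List.mem_singleton] at hm
                        subst hm
                        exact Or.inr (by simp)
                  have hlt := pvPhi_push_pos i' j' d rest
                  obtain ⟨r1, r2, r3⟩ := ih _ memo (by omega) hok hgs'
                  refine ⟨r1, r2, ?_⟩
                  intro e he
                  rcases List.mem_cons.mp he with rfl | he'
                  · exact r3 (i'+1, j'+1, d, true) (by simp)
                  · exact r3 e (by simp [he'])
                · rw [if_neg hd]
                  have hgs' : GS t1 t2 ((i'+1, j', d, false) :: (i', j'+1, d, false) ::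
                      (i'+1, j'+1, d, true) :: rest) [] memo := by
                    refine ⟨by simp, by simp, ?_, ?_⟩
                    · intro _ p hp
                      rw [pvDeps_zerod t1 t2 i' j' d hch hd] at hp
                      simp only [List.mem_cons, List.not_mem_nil, or_false] at hp
                      rcases hp with rfl | rfl
                      · exact Or.inr (by simp)
                      · exact Or.inr (by simp)
                    · refine GS_mono t1 t2 rest _ _ _ _ ?_ hgs2
                      intro p hp
                      rcases hp with hm | hm
                      · exact Or.inl hm
                      · simp only [List.mem_singleton] at hm
                        subst hm
                        exact Or.inr (by simp)
                  have hlt := pvPhi_push_zero i' j' d rest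
                  obtain ⟨r1, r2, r3⟩ := ih _ memo (by omega) hok hgs'
                  refine ⟨r1, r2, ?_⟩
                  intro e he
                  rcases List.mem_cons.mp he with rfl | he'
                  · exact r3 (i'+1, j'+1, d, true) (by simp)
                  · exact r3 e (by simp [he'])
            · rw [if_neg hexp]
              have hexp' : expanded = true := by
                cases expanded
                · exact absurd rfl hexp
                · rfl
              have hdeps := hgs1 hexp'
              by_cases hch : t1.getD i' ' ' = t2.getD j' ' '
              · rw [if_pos hch]
                have hdep1 : memo.contains ((i', j', d) : Nat × Nat × Nat) = true := by
                  have := hdeps (i', j', d)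
                    (by rw [pvDeps_eqc t1 t2 i' j' d hch]; simp)
                  simpa using this
                have hres : memo.getD ((i', j', d) : Nat × Nat × Nat) 0 + 1 =
                    pvF t1 t2 (i'+1) (j'+1) d := by
                  rw [getD_eq_pvF_of_contains hok hdep1]
                  cases d with
                  | zero => rw [pvF_succ_zero, if_pos hch]
                  | succ e' => rw [pvF_succ_succ, if_pos hch]
                have hok1 : MemoOkH t1 t2 (memo.insert (i'+1, j'+1, d)
                    (memo.getD ((i', j', d) : Nat × Nat × Nat) 0 + 1)) := by
                  have := memoOkH_insert hok (i'+1) (j'+1) d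
                  rwa [← hres] at this
                have hgs' : GS t1 t2 rest [] (memo.insert (i'+1, j'+1, d)
                    (memo.getD ((i', j', d) : Nat × Nat × Nat) 0 + 1)) := by
                  refine GS_mono t1 t2 rest _ _ _ _ ?_ hgs2
                  intro p hp
                  rcases hp with hm | hm
                  · exact Or.inl (contains_of_contains_insert hm)
                  · simp only [List.mem_singleton] at hm
                    subst hm
                    exact Or.inl (contains_insert_self _ _)
                obtain ⟨r1, r2, r3⟩ := ih rest _ (by omega) hok1 hgs'
                refine ⟨r1, fun p hp => r2 p (contains_of_contains_insert hp), ?_⟩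
                intro e he
                rcases List.mem_cons.mp he with rfl | he'
                · exact r2 _ (contains_insert_self _ _)
                · exact r3 e he'
              · rw [if_neg hch]
                by_cases hd : 0 < d
                · rw [if_pos hd]
                  obtain ⟨d', rfl⟩ := Nat.exists_eq_succ_of_ne_zero (show d ≠ 0 by omega)
                  simp only [Nat.succ_sub_one]
                  have hdl : memo.contains ((i', j'+1, d'+1) : Nat × Nat × Nat) = true := by
                    have := hdeps (i', j'+1, d'+1)
                      (by rw [pvDeps_posd t1 t2 i' j' (d'+1) hch (by omega)]; simp)
                    simpa using this
                  have hdr : memo.contains ((i'+1, j', d'+1) : Nat × Nat × Nat) = true := by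
                    have := hdeps (i'+1, j', d'+1)
                      (by rw [pvDeps_posd t1 t2 i' j' (d'+1) hch (by omega)]; simp)
                    simpa using this
                  have hdd : memo.contains ((i', j', d') : Nat × Nat × Nat) = true := by
                    have := hdeps (i', j', d')
                      (by rw [pvDeps_posd t1 t2 i' j' (d'+1) hch (by omega)]; simp)
                    simpa using this
                  have hres : max (max (memo.getD ((i', j'+1, d'+1) : Nat × Nat × Nat) 0)
                        (memo.getD ((i'+1, j', d'+1) : Nat × Nat × Nat) 0))
                        (memo.getD ((i', j', d') : Nat × Nat × Nat) 0 + 1) =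
                      pvF t1 t2 (i'+1) (j'+1) (d'+1) := by
                    rw [getD_eq_pvF_of_contains hok hdl, getD_eq_pvF_of_contains hok hdr,
                      getD_eq_pvF_of_contains hok hdd, pvF_succ_succ, if_neg hch]
                  have hok1 : MemoOkH t1 t2 (memo.insert (i'+1, j'+1, d'+1)
                      (max (max (memo.getD ((i', j'+1, d'+1) : Nat × Nat × Nat) 0)
                        (memo.getD ((i'+1, j', d'+1) : Nat × Nat × Nat) 0))
                        (memo.getD ((i', j', d') : Nat × Nat × Nat) 0 + 1))) := by
                    have := memoOkH_insert hok (i'+1) (j'+1) (d'+1)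
                    rwa [← hres] at this
                  have hgs' : GS t1 t2 rest []
                      (memo.insert (i'+1, j'+1, d'+1)
                        (max (max (memo.getD ((i', j'+1, d'+1) : Nat × Nat × Nat) 0)
                          (memo.getD ((i'+1, j', d'+1) : Nat × Nat × Nat) 0))
                          (memo.getD ((i', j', d') : Nat × Nat × Nat) 0 + 1))) := by
                    refine GS_mono t1 t2 rest _ _ _ _ ?_ hgs2
                    intro p hp
                    rcases hp with hm | hm
                    · exact Or.inl (contains_of_contains_insert hm)
                    · simp only [List.mem_singleton] at hm
                      subst hm
                      exact Or.inl (contains_insert_self _ _)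
                  obtain ⟨r1, r2, r3⟩ := ih rest _ (by omega) hok1 hgs'
                  refine ⟨r1, fun p hp => r2 p (contains_of_contains_insert hp), ?_⟩
                  intro e he
                  rcases List.mem_cons.mp he with rfl | he'
                  · exact r2 _ (contains_insert_self _ _)
                  · exact r3 e he'
                · rw [if_neg hd]
                  have hd0 : d = 0 := by omega
                  subst hd0
                  have hdl : memo.contains ((i', j'+1, 0) : Nat × Nat × Nat) = true := by
                    have := hdeps (i', j'+1, 0)
                      (by rw [pvDeps_zerod t1 t2 i' j' 0 hch (by omega)]; simp)
                    simpa using this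
                  have hdr : memo.contains ((i'+1, j', 0) : Nat × Nat × Nat) = true := by
                    have := hdeps (i'+1, j', 0)
                      (by rw [pvDeps_zerod t1 t2 i' j' 0 hch (by omega)]; simp)
                    simpa using this
                  have hres : max (memo.getD ((i', j'+1, 0) : Nat × Nat × Nat) 0)
                        (memo.getD ((i'+1, j', 0) : Nat × Nat × Nat) 0) =
                      pvF t1 t2 (i'+1) (j'+1) 0 := by
                    rw [getD_eq_pvF_of_contains hok hdl, getD_eq_pvF_of_contains hok hdr,
                      pvF_succ_zero, if_neg hch]
                  have hok1 : MemoOkH t1 t2 (memo.insert (i'+1, j'+1, 0)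
                      (max (memo.getD ((i', j'+1, 0) : Nat × Nat × Nat) 0)
                        (memo.getD ((i'+1, j', 0) : Nat × Nat × Nat) 0))) := by
                    have := memoOkH_insert hok (i'+1) (j'+1) 0
                    rwa [← hres] at this
                  have hgs' : GS t1 t2 rest []
                      (memo.insert (i'+1, j'+1, 0)
                        (max (memo.getD ((i', j'+1, 0) : Nat × Nat × Nat) 0)
                          (memo.getD ((i'+1, j', 0) : Nat × Nat × Nat) 0))) := by
                    refine GS_mono t1 t2 rest _ _ _ _ ?_ hgs2
                    intro p hp
                    rcases hp with hm | hm
                    · exact Or.inl (contains_of_contains_insert hm)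
                    · simp only [List.mem_singleton] at hm
                      subst hm
                      exact Or.inl (contains_insert_self _ _)
                  obtain ⟨r1, r2, r3⟩ := ih rest _ (by omega) hok1 hgs'
                  refine ⟨r1, fun p hp => r2 p (contains_of_contains_insert hp), ?_⟩
                  intro e he
                  rcases List.mem_cons.mp he with rfl | he'
                  · exact r2 _ (contains_insert_self _ _)
                  · exact r3 e he'
  intro stack memo hok hgs
  exact main (pvPhi stack) stack memo le_rfl hok hgs

-- the outer loop's state after the first t values of d
def LayerInv (t1 t2 : List Char) (t : Nat)
    (st : Std.HashMap (Nat × Nat × Nat) Int × List Int) : Prop :=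
  MemoOkH t1 t2 st.1 ∧
  st.2 = (List.range t).map (fun d => pvF t1 t2 t1.length t2.length d)

theorem layers_final (t1 t2 : List Char) (K : Nat) :
    LayerInv t1 t2 K ((List.range K).foldl
      (fun (st : Std.HashMap (Nat × Nat × Nat) Int × List Int) d =>
        let memo := pvRun t1 t2 [(t1.length, t2.length, d, false)] st.1
        (memo, st.2 ++ [memo.getD (t1.length, t2.length, d) 0])) (∅, [])) := by
  apply foldl_range_inv _ (LayerInv t1 t2)
  · refine ⟨?_, by simp⟩
    intro i j d v hv
    simp at hv
  · intro t st ht h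
    obtain ⟨hm, hres⟩ := h
    have hgs : GS t1 t2 [(t1.length, t2.length, t, false)] [] st.1 := ⟨by simp, trivial⟩
    obtain ⟨h1, h2, h3⟩ := pvRun_correct t1 t2 [(t1.length, t2.length, t, false)] st.1 hm hgs
    have hc := h3 (t1.length, t2.length, t, false) (List.mem_singleton.mpr rfl)
    refine ⟨h1, ?_⟩
    show st.2 ++ [(pvRun t1 t2 [(t1.length, t2.length, t, false)] st.1).getD
      (t1.length, t2.length, t) 0] = _
    rw [hres, List.range_succ, List.map_append, getD_eq_pvF_of_contains h1 hc]
    rfl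

-- ===== VERDICT (by name: the statement is the Claim_ definition above) =====
theorem lcs_with_k_differences_spec : Claim_equal_lcs_with_k_differences := by
  intro text1 text2 k _ _
  unfold Spec_lcs_with_k_differences
  unfold lcs_with_k_differences lcs_with_k_differences_alt
  have hmap : (List.range (k+1).toNat).map (fun d =>
      pvGet3 ((List.range text1.toList.length).foldl (fun dp i0 =>
        (List.range text2.toList.length).foldl (fun dp j0 =>
          (List.range (k+1).toNat).foldl (fun dp d => pvCellA text1.toList text2.toList (i0+1) (j0+1) d dp) dp) dp)
        (List.replicate (text1.toList.length+1) (List.replicate (text2.toList.length+1) (List.replicate (k+1).toNat (0:Int)))))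
        text1.toList.length text2.toList.length d)
      = (List.range (k+1).toNat).map (fun d => pvF text1.toList text2.toList text1.toList.length text2.toList.length d) := by
    apply List.map_congr_left
    intro d hd
    exact dp_final text1.toList text2.toList ((k+1).toNat) d (List.mem_range.mp hd)
  have hB := (layers_final text1.toList text2.toList ((k+1).toNat)).2
  simp only []
  rw [hmap, hB]
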